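-- pv_equiv track=rewrite | github.com/Nareeek/Codesignal_tasks | mergeStrings.py | mergeStrings
-- ===== SOURCE A (Python) =====
-- def mergeStrings(s1, s2):
--     itog = ""
--     i = 0
--
--     while i < (len(s1) + len(s2)):
--         if len(s1) == 0:
--             itog += s2[i:]
--             return itog
--         elif len(s2) == 0:
--             itog += s1[i:]
--             return itog
--
--         if s1.count(s1[i]) < s2.count(s2[i]):
--             itog += s1[i]
--             s1 = s1[i + 1:]
--         elif s2.count(s2[i]) < s1.count(s1[i]):
--             itog += s2[i]
--             s2 = s2[i + 1:]
--         elif (s2.count(s2[i]) == s1.count(s1[i])) and (ord(s1[i]) != ord(s2[i])):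
--             if ord(s1[i]) < ord(s2[i]):
--                 itog += s1[i]
--                 s1 = s1[i + 1:]
--             elif ord(s2[i]) < ord(s1[i]):
--                 itog += s2[i]
--                 s2 = s2[i + 1:]
--         elif (s2.count(s2[i]) == s1.count(s1[i])) and (ord(s1[i]) == ord(s2[i])):
--             itog += s1[i]
--             s1 = s1[i + 1:]
--
--     return itog
-- ===== SOURCE B (Python) =====
-- def mergeStrings(s1, s2):
--     # Count each char once, then merge with two pointers, decrementing
--     # counts incrementally; order key is (remaining count, ord), ties to s1.
--     c1 = {}
--     for ch in s1:
--         c1[ch] = c1.get(ch, 0) + 1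
--     c2 = {}
--     for ch in s2:
--         c2[ch] = c2.get(ch, 0) + 1
--     out = []
--     i = j = 0
--     while i < len(s1) and j < len(s2):
--         a, b = s1[i], s2[j]
--         if c1[a] < c2[b] or (c1[a] == c2[b] and a <= b):
--             out.append(a)
--             c1[a] -= 1
--             i += 1
--         else:
--             out.append(b)
--             c2[b] -= 1
--             j += 1
--     return "".join(out) + s1[i:] + s2[j:]
-- ===== Notes on version B (the rewrite author's own statement) =====
-- stated objective: faster
-- what changed: Replaced A's quadratic loop that re-slices both strings and recomputes str.count on every step with a single pre-computed char-count dict per string, two index pointers and incremental decrements, joining a list at the end.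
import Mathlib
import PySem

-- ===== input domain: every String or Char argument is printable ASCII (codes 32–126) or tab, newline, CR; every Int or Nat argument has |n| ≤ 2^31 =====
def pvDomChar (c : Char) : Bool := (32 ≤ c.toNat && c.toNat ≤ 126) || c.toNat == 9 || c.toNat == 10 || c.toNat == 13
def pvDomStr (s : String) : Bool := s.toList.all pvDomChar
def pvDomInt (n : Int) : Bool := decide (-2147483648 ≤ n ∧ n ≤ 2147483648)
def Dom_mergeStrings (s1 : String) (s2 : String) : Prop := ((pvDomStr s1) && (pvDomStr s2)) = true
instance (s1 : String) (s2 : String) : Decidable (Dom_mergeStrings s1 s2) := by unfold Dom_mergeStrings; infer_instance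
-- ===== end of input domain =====

-- B replaces A's quadratic re-slice/recount merge by one-pass counters with two pointers (objective: faster, asymptotic).

-- ===== PORT A =====
-- In A the loop variable i is initialised to 0 and never changed, so s1[i] is the head
-- of the remaining s1, s1[i+1:] its tail, and s1[i:] the whole remaining s1; the port
-- recurses on the remaining (List Char) suffixes exactly as A reassigns s1/s2.
-- s.count(c) for the single character c is List.count on the chars (PySem.List.count_eq).
-- ord x < ord y on chars is exactly Char's < (codepoint order), and ord x ≠ ord y is x ≠ y.
def mergeA : List Char → List Char → List Char
  | [], s2 => s2                                   -- len(s1) == 0: itog += s2[i:]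
  | s1, [] => s1                                   -- len(s2) == 0: itog += s1[i:]
  | a :: t1, b :: t2 =>
    if (a :: t1).count a < (b :: t2).count b then
      a :: mergeA t1 (b :: t2)
    else if (b :: t2).count b < (a :: t1).count a then
      b :: mergeA (a :: t1) t2
    else if a ≠ b then                             -- counts equal here (first two tests failed)
      -- A's sub-chain: ord s1[i] < ord s2[i] → take s1; elif ord s2[i] < ord s1[i] → take s2.
      -- a ≠ b makes these two exhaustive, so the else-arm below is A's second elif.
      if a < b then a :: mergeA t1 (b :: t2) else b :: mergeA (a :: t1) t2
    else                                           -- counts equal and s1[i] == s2[i]: take s1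
      a :: mergeA t1 (b :: t2)
  termination_by s1 s2 => s1.length + s2.length
  decreasing_by all_goals (simp [List.length_cons]; try omega)

def mergeStrings (s1 : String) (s2 : String) : String :=
  String.ofList (mergeA s1.toList s2.toList)

-- ===== PORT B =====
-- counter-building loop of Source B: for ch in s: c[ch] = c.get(ch, 0) + 1
def mergeCounter (s : List Char) : PySem.Dict Char Int :=
  s.foldl (fun d ch => d.insert ch (d.getD ch 0 + 1)) PySem.Dict.empty

-- Source B's while loop: two pointers = the two remaining suffixes; counters carried and
-- decremented in place (c[x] -= 1 with x certainly present = insert of getD - 1).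
def mergeLoop : List Char → List Char → PySem.Dict Char Int → PySem.Dict Char Int → List Char
  | [], s2, _, _ => s2                             -- loop exit: "" + s1[i:] + s2[j:]
  | s1, [], _, _ => s1
  | a :: t1, b :: t2, c1, c2 =>
    if c1.getD a 0 < c2.getD b 0 ∨ (c1.getD a 0 = c2.getD b 0 ∧ a ≤ b) then
      a :: mergeLoop t1 (b :: t2) (c1.insert a (c1.getD a 0 - 1)) c2
    else
      b :: mergeLoop (a :: t1) t2 c1 (c2.insert b (c2.getD b 0 - 1))
  termination_by s1 s2 _ _ => s1.length + s2.length
  decreasing_by all_goals (simp [List.length_cons]; try omega)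

def mergeStrings_alt (s1 : String) (s2 : String) : String :=
  String.ofList (mergeLoop s1.toList s2.toList (mergeCounter s1.toList) (mergeCounter s2.toList))

-- ===== PRECONDITION & SPEC =====
def Spec_mergeStrings (s1 : String) (s2 : String) (out : String) : Prop := out = mergeStrings_alt s1 s2
instance (s1 : String) (s2 : String) (out : String) : Decidable (Spec_mergeStrings s1 s2 out) := by unfold Spec_mergeStrings; infer_instance

-- ===== CLAIM (what is proved, stated in full; the proofs are below) =====
def Claim_equal_mergeStrings : Prop := ∀ (s1 : String) (s2 : String), Dom_mergeStrings s1 s2 → Spec_mergeStrings s1 s2 (mergeStrings s1 s2)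

-- ===== LEMMAS AND PROOFS =====

-- the counters built by Source B's first two loops hold exactly the char counts
theorem mergeCounter_getD (s : List Char) (c : Char) :
    (mergeCounter s).getD c 0 = (s.count c : Int) := by
  simp [mergeCounter, PySem.Dict.getD_foldl_insert_add_one, PySem.Dict.getD_empty]

-- loop invariant: while each counter reports the counts of its remaining suffix,
-- B's single lexicographic test makes the same choice as A's four-branch chain.
theorem mergeLoop_eq_mergeA (s1 s2 : List Char) (c1 c2 : PySem.Dict Char Int)
    (h1 : ∀ c, c1.getD c 0 = (s1.count c : Int))
    (h2 : ∀ c, c2.getD c 0 = (s2.count c : Int)) :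
    mergeLoop s1 s2 c1 c2 = mergeA s1 s2 := by
  induction s1, s2, c1, c2 using mergeLoop.induct with
  | case1 s2 c1 c2 => simp [mergeLoop, mergeA]
  | case2 s1 c1 c2 hne =>
      cases s1 with
      | nil => simp [mergeLoop, mergeA]
      | cons a t1 => simp [mergeLoop, mergeA]
  | case3 a t1 b t2 c1 c2 hcond ih =>
      have key1 : ∀ c, (c1.insert a (c1.getD a 0 - 1)).getD c 0 = (t1.count c : Int) := by
        intro c
        rw [PySem.Dict.getD_insert]
        by_cases hc : c = a
        · subst hc; rw [h1, List.count_cons_self]; simp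
        · rw [if_neg hc, h1]; simp [Ne.symm hc]
      have hc' : ((a :: t1).count a : Int) < ((b :: t2).count b : Int) ∨
          ((a :: t1).count a : Int) = ((b :: t2).count b : Int) ∧ a ≤ b := by
        rw [← h1, ← h2]; exact hcond
      simp only [mergeLoop]
      rw [if_pos hcond, ih key1 h2]
      rcases hc' with hlt | ⟨heq, hle⟩
      · have h : (a :: t1).count a < (b :: t2).count b := by exact_mod_cast hlt
        simp only [mergeA]
        rw [if_pos h]
      · have heqn : (a :: t1).count a = (b :: t2).count b := by exact_mod_cast heq
        have h1n : ¬ (a :: t1).count a < (b :: t2).count b := by omega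
        have h2n : ¬ (b :: t2).count b < (a :: t1).count a := by omega
        rcases lt_or_eq_of_le hle with hab | hab
        · simp only [mergeA]
          rw [if_neg h1n, if_neg h2n, if_pos (ne_of_lt hab), if_pos hab]
        · subst hab
          simp only [mergeA]
          rw [if_neg h1n, if_neg h2n, if_neg (by simp)]
  | case4 a t1 b t2 c1 c2 hcond ih =>
      have key2 : ∀ c, (c2.insert b (c2.getD b 0 - 1)).getD c 0 = (t2.count c : Int) := by
        intro c
        rw [PySem.Dict.getD_insert]
        by_cases hc : c = b
        · subst hc; rw [h2, List.count_cons_self]; simp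
        · rw [if_neg hc, h2]; simp [Ne.symm hc]
      have hc' : ¬ (((a :: t1).count a : Int) < ((b :: t2).count b : Int) ∨
          ((a :: t1).count a : Int) = ((b :: t2).count b : Int) ∧ a ≤ b) := by
        rw [← h1, ← h2]; exact hcond
      simp only [mergeLoop]
      rw [if_neg hcond, ih h1 key2]
      rw [not_or, not_and, not_lt] at hc'
      obtain ⟨hge, himp⟩ := hc'
      rcases lt_or_eq_of_le hge with hlt | heq
      · have h2n : (b :: t2).count b < (a :: t1).count a := by exact_mod_cast hlt
        have h1n : ¬ (a :: t1).count a < (b :: t2).count b := by omega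
        simp only [mergeA]
        rw [if_neg h1n, if_pos h2n]
      · have heqn : (a :: t1).count a = (b :: t2).count b := by exact_mod_cast heq.symm
        have h1n : ¬ (a :: t1).count a < (b :: t2).count b := by omega
        have h2n : ¬ (b :: t2).count b < (a :: t1).count a := by omega
        have hba : b < a := by
          rcases lt_trichotomy a b with h | h | h
          · exact absurd (le_of_lt h) (by simpa using himp heq.symm)
          · exact absurd (le_of_eq h) (by simpa using himp heq.symm)
          · exact h
        simp only [mergeA]
        rw [if_neg h1n, if_neg h2n, if_pos (ne_of_gt hba), if_neg (not_lt_of_gt hba)]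

-- ===== VERDICT (by name: the statement is the Claim_ definition above) =====
theorem mergeStrings_spec : Claim_equal_mergeStrings := by
  intro s1 s2 _
  unfold Spec_mergeStrings mergeStrings mergeStrings_alt
  rw [mergeLoop_eq_mergeA _ _ _ _ (mergeCounter_getD _) (mergeCounter_getD _)]
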